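-- pv_equiv track=rewrite | github.com/B-Gendron/sentEmoContext | SiameseNetworks/code/utils.py | emotional_label_spreading
-- ===== SOURCE A (Python) =====
-- def emotional_label_spreading(emotions):
--     """
--     Perform label spreading on a list of emotions to address imbalance issues.
--
--     This function propagates a relatively rare emotional label that is already present
--     in the list to all elements of the list, aiming to balance the emotional distribution.
--
--     Args:
--         emotions (list): A one-dimensional list of emotions representing a single DailyDialog data sample.
--
--     Returns:
--         list: A list of emotions corresponding to the same sample after applying emotional label spreading.
--     """
--     emo_label = 0
--     n = len(emotions)
--     n_without_pad = emotions.index(-1) if -1 in emotions else n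
--     padded_part = emotions[n_without_pad:]
--     i = 0
--     while i < n_without_pad:
--         emo = emotions[i]
--
--         # if we reach neutrality, we keep searching
--         if emo == 0:
--             i += 1
--
--         # if we reach "happiness" label, we store this information and keep searching
--         elif emo == 4:
--             i += 1
--             emo_label = emo
--
--         # if we reach a rare emotional label, we are done
--         else:
--             return [emo for _ in range(n_without_pad)] + padded_part
--
--     # if this point is reached, nothing has been returned, meaning no rarer label than either 0 or 4 has been found
--     return [emo_label for _ in range(n_without_pad)] + padded_part
-- ===== SOURCE B (Python) =====
-- def emotional_label_spreading(emotions):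
--     n_without_pad = emotions.index(-1) if -1 in emotions else len(emotions)
--     # right-to-left scan with a priority accumulator: a rare label always
--     # overwrites (so the leftmost rare label survives); a 4 only overwrites
--     # a non-rare accumulator; 0 never overwrites.
--     fill = 0
--     for e in reversed(emotions[:n_without_pad]):
--         if e != 0 and e != 4:
--             fill = e
--         elif e == 4 and (fill == 0 or fill == 4):
--             fill = 4
--     return [fill] * n_without_pad + emotions[n_without_pad:]
-- ===== Notes on version B (the rewrite author's own statement) =====
-- stated objective: alternative
-- what changed: Replaces A's forward early-return scan that tracks a seen 4 with a right-to-left fold over the unpadded prefix maintaining a priority accumulator (rare label always overwrites, 4 only overwrites a non-rare accumulator, 0 never does), so the leftmost rare label survives without any early return.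
import Mathlib
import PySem

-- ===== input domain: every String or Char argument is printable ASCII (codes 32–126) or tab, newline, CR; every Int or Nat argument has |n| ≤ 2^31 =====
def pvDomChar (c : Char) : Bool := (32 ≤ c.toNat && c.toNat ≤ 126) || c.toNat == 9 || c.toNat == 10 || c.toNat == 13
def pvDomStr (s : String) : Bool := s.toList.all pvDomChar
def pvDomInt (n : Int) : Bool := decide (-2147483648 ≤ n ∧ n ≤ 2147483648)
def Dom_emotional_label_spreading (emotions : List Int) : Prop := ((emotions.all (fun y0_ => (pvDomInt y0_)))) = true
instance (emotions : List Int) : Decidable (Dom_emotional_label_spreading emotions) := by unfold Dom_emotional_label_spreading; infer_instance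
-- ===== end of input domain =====

-- B replaces A's forward early-return scan with a right-to-left fold and a priority accumulator; return value only, no mutation.

-- ===== PORT A =====
-- the while-loop: i counts up, emo_label is the mutable state
def elsLoop (emotions : List Int) (nwp : Nat) (padded : List Int) (i : Nat) (emo_label : Int) : List Int :=
  if _h : i < nwp then
    let emo := emotions.getD i 0   -- emotions[i]; always in range since i < nwp ≤ len
    if emo = 0 then elsLoop emotions nwp padded (i + 1) emo_label
    else if emo = 4 then elsLoop emotions nwp padded (i + 1) emo
    else List.replicate nwp emo ++ padded
  else List.replicate nwp emo_label ++ padded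
termination_by nwp - i

def emotional_label_spreading (emotions : List Int) : List Int :=
  let n := emotions.length
  let n_without_pad := match PySem.List.index? emotions (-1) with
    | some k => k
    | none => n
  let padded_part := emotions.drop n_without_pad   -- emotions[nwp:], nwp ≥ 0 so drop is exact
  elsLoop emotions n_without_pad padded_part 0 0

-- ===== PORT B =====
-- one step of B's backwards for-loop (fill is the accumulator)
def bStep (fill e : Int) : Int :=
  if e ≠ 0 ∧ e ≠ 4 then e
  else if e = 4 ∧ (fill = 0 ∨ fill = 4) then 4
  else fill

def emotional_label_spreading_alt (emotions : List Int) : List Int :=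
  let n_without_pad := match PySem.List.index? emotions (-1) with
    | some k => k
    | none => emotions.length
  -- 'for e in reversed(emotions[:n]):' = foldl over the reversed prefix
  let fill := ((emotions.take n_without_pad).reverse).foldl bStep 0
  List.replicate n_without_pad fill ++ emotions.drop n_without_pad

-- ===== PRECONDITION & SPEC =====
def Spec_emotional_label_spreading (emotions : List Int) (out : List Int) : Prop := out = emotional_label_spreading_alt emotions
instance (emotions : List Int) (out : List Int) : Decidable (Spec_emotional_label_spreading emotions out) := by unfold Spec_emotional_label_spreading; infer_instance

-- ===== CLAIM (what is proved, stated in full; the proofs are below) =====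
def Claim_equal_emotional_label_spreading : Prop := ∀ (emotions : List Int), Dom_emotional_label_spreading emotions → Spec_emotional_label_spreading emotions (emotional_label_spreading emotions)

-- ===== LEMMAS AND PROOFS =====

-- functional view of A's loop: first rare label wins, else last-seen-4 state
def elsFill (l : List Int) (label : Int) : Int :=
  match l with
  | [] => label
  | e :: rest => if e = 0 then elsFill rest label else if e = 4 then elsFill rest 4 else e

theorem elsFill_four_ne_zero (l : List Int) : elsFill l 4 ≠ 0 := by
  induction l with
  | nil => decide
  | cons e rest ih =>
    show (if e = 0 then elsFill rest 4 else if e = 4 then elsFill rest 4 else e) ≠ 0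
    split_ifs with h0 h4
    · exact ih
    · exact ih
    · exact h0

theorem elsFill_four (l : List Int) :
    elsFill l 4 = if elsFill l 0 = 0 ∨ elsFill l 0 = 4 then 4 else elsFill l 0 := by
  induction l with
  | nil => decide
  | cons e rest ih =>
    show (if e = 0 then elsFill rest 4 else if e = 4 then elsFill rest 4 else e)
      = if (if e = 0 then elsFill rest 0 else if e = 4 then elsFill rest 4 else e) = 0
          ∨ (if e = 0 then elsFill rest 0 else if e = 4 then elsFill rest 4 else e) = 4
        then 4
        else (if e = 0 then elsFill rest 0 else if e = 4 then elsFill rest 4 else e)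
    by_cases h0 : e = 0
    · simpa [h0] using ih
    · by_cases h4 : e = 4
      · simp only [h0, if_false, h4, if_true]
        have hne := elsFill_four_ne_zero rest
        by_cases hf : elsFill rest 4 = 4
        · simp [hf]
        · simp [hf, hne]
      · simp [h0, h4]

theorem rev_foldl_eq_elsFill (l : List Int) :
    (l.reverse.foldl bStep 0) = elsFill l 0 := by
  induction l with
  | nil => rfl
  | cons e rest ih =>
    rw [List.reverse_cons, List.foldl_append, ih]
    show bStep (elsFill rest 0) e
      = if e = 0 then elsFill rest 0 else if e = 4 then elsFill rest 4 else e
    unfold bStep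
    by_cases h0 : e = 0
    · simp [h0]
    · by_cases h4 : e = 4
      · simp only [h0, h4, if_false, if_true, not_true, and_false, false_and, if_neg,
          and_true, true_and, ne_eq, not_false_iff]
        rw [elsFill_four rest]
        by_cases hc : elsFill rest 0 = 0 ∨ elsFill rest 0 = 4
        · simp [hc]
        · simp [hc]
      · simp [h0, h4]

-- A's loop computes replicate with elsFill of the remaining prefix
theorem elsLoop_eq (emotions : List Int) (nwp : Nat) (padded : List Int)
    (hn : nwp ≤ emotions.length) :
    ∀ i label, i ≤ nwp →
      elsLoop emotions nwp padded i label =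
        List.replicate nwp (elsFill ((emotions.take nwp).drop i) label) ++ padded := by
  intro i label hi
  induction hd : nwp - i generalizing i label with
  | zero =>
    have hie : i = nwp := by omega
    subst hie
    rw [elsLoop]
    simp [elsFill]
  | succ k ih =>
    have hlt : i < nwp := by omega
    have hil : i < emotions.length := by omega
    have hget : emotions.getD i 0 = emotions[i] := by
      simp [List.getD, List.getElem?_eq_getElem hil]
    have hdrop : (emotions.take nwp).drop i = emotions[i] :: (emotions.take nwp).drop (i + 1) := by
      have h1 : i < (emotions.take nwp).length := by simp; omega
      rw [List.drop_eq_getElem_cons h1]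
      congr 1
      simp [List.getElem_take]
    rw [elsLoop]
    simp only [hlt, dif_pos, hget]
    by_cases h0 : emotions[i] = 0
    · rw [ih (i+1) label (by omega) (by omega), hdrop]
      simp [elsFill, h0]
    · by_cases h4 : emotions[i] = 4
      · rw [ih (i+1) (emotions[i]) (by omega) (by omega), hdrop]
        simp [elsFill, h4]
      · simp only [h0, h4, if_false]
        rw [hdrop]
        simp [elsFill, h0, h4]

theorem nwp_le (emotions : List Int) :
    (match PySem.List.index? emotions (-1) with
     | some k => k
     | none => emotions.length) ≤ emotions.length := by
  cases h : PySem.List.index? emotions (-1) with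
  | none => simp
  | some k =>
    obtain ⟨hk, -⟩ := PySem.List.getElem_of_index?_eq_some h
    simpa using Nat.le_of_lt hk

-- ===== VERDICT (by name: the statement is the Claim_ definition above) =====
theorem emotional_label_spreading_spec : Claim_equal_emotional_label_spreading := by
  intro emotions _
  unfold Spec_emotional_label_spreading emotional_label_spreading emotional_label_spreading_alt
  dsimp only
  have hle := nwp_le emotions
  rw [elsLoop_eq emotions _ _ hle 0 0 (Nat.zero_le _)]
  rw [List.drop_zero, rev_foldl_eq_elsFill]
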